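-- pv_equiv track=rewrite | github.com/srsbiz0101-netizen/2k10QuickGameBot | overlay_stats.py | compute_total_extremes
-- ===== SOURCE A (Python) =====
-- def compute_total_extremes(games):
--     if not games:
--         return None, None
--
--     with_totals = [
--         (gnum, t1, s1, t2, s2, s1 + s2)
--         for (gnum, _ts, t1, s1, t2, s2) in games
--     ]
--     return (
--         max(with_totals, key=lambda x: x[5]),
--         min(with_totals, key=lambda x: x[5]),
--     )
-- ===== SOURCE B (Python) =====
-- def compute_total_extremes(games):
--     if not games:
--         return None, None
--     it = iter(games)
--     gnum, _ts, t1, s1, t2, s2 = next(it)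
--     best = worst = (gnum, t1, s1, t2, s2, s1 + s2)
--     for gnum, _ts, t1, s1, t2, s2 in it:
--         x = (gnum, t1, s1, t2, s2, s1 + s2)
--         if x[5] > best[5]:
--             best = x
--         if x[5] < worst[5]:
--             worst = x
--     return best, worst
-- ===== Notes on version B (the rewrite author's own statement) =====
-- stated objective: alternative
-- what changed: Replaces the intermediate with_totals list plus two separate max/min scans by a single pass keeping running best/worst tuples with strict-inequality updates (first occurrence wins ties, as with max/min).
import Mathlib
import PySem

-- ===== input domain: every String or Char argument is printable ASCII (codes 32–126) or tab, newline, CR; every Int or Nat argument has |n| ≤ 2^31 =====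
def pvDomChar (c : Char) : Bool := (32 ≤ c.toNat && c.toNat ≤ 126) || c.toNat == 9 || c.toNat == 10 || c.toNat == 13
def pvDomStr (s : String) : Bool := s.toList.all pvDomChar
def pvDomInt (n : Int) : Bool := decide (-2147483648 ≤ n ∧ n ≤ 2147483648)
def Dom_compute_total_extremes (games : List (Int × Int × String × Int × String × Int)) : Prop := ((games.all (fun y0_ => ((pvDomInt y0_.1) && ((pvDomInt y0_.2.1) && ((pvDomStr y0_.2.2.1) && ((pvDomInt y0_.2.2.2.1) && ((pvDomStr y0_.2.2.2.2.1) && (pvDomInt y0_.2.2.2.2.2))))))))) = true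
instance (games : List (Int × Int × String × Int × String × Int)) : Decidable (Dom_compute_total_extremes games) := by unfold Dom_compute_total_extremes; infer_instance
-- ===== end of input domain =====

-- B replaces the with_totals list plus two max/min scans by one pass keeping running best/worst
-- (objective: alternative decomposition, no intermediate list). Return values proved equal.

-- ===== PORT A =====
-- the 6-tuple (gnum, t1, s1, t2, s2, s1 + s2) built by A's list comprehension
def cteTupA (g : Int × Int × String × Int × String × Int) : Int × String × Int × String × Int × Int :=
  (g.1, g.2.2.1, g.2.2.2.1, g.2.2.2.2.1, g.2.2.2.2.2, g.2.2.2.1 + g.2.2.2.2.2)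

-- Python max(xs, key=λx. x[5]) / min(...): first extremal element wins, fold over the list
def cteMaxStep (acc x : Int × String × Int × String × Int × Int) : Int × String × Int × String × Int × Int :=
  if x.2.2.2.2.2 > acc.2.2.2.2.2 then x else acc
def cteMinStep (acc x : Int × String × Int × String × Int × Int) : Int × String × Int × String × Int × Int :=
  if x.2.2.2.2.2 < acc.2.2.2.2.2 then x else acc

def compute_total_extremes (games : List (Int × Int × String × Int × String × Int)) : (Option (Int × String × Int × String × Int × Int)) × (Option (Int × String × Int × String × Int × Int)) :=
  match games with
  | [] => (none, none)
  | _ :: _ =>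
    let with_totals := games.map cteTupA
    match with_totals with
    | [] => (none, none)   -- unreachable: games nonempty
    | h :: t => (some (t.foldl cteMaxStep h), some (t.foldl cteMinStep h))

-- ===== PORT B =====
-- single pass: state (best, worst), strict-inequality updates preserving first occurrence
def cteStepB (bw : (Int × String × Int × String × Int × Int) × (Int × String × Int × String × Int × Int))
    (g : Int × Int × String × Int × String × Int) :
    (Int × String × Int × String × Int × Int) × (Int × String × Int × String × Int × Int) :=
  let x : Int × String × Int × String × Int × Int :=
    (g.1, g.2.2.1, g.2.2.2.1, g.2.2.2.2.1, g.2.2.2.2.2, g.2.2.2.1 + g.2.2.2.2.2)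
  ((if x.2.2.2.2.2 > bw.1.2.2.2.2.2 then x else bw.1),
   (if x.2.2.2.2.2 < bw.2.2.2.2.2.2 then x else bw.2))

def compute_total_extremes_alt (games : List (Int × Int × String × Int × String × Int)) : (Option (Int × String × Int × String × Int × Int)) × (Option (Int × String × Int × String × Int × Int)) :=
  match games with
  | [] => (none, none)
  | g :: rest =>
    let first : Int × String × Int × String × Int × Int :=
      (g.1, g.2.2.1, g.2.2.2.1, g.2.2.2.2.1, g.2.2.2.2.2, g.2.2.2.1 + g.2.2.2.2.2)
    let bw := rest.foldl cteStepB (first, first)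
    (some bw.1, some bw.2)

-- ===== PRECONDITION & SPEC =====
def Spec_compute_total_extremes (games : List (Int × Int × String × Int × String × Int)) (out : (Option (Int × String × Int × String × Int × Int)) × (Option (Int × String × Int × String × Int × Int))) : Prop := out = compute_total_extremes_alt games
instance (games : List (Int × Int × String × Int × String × Int)) (out : (Option (Int × String × Int × String × Int × Int)) × (Option (Int × String × Int × String × Int × Int)) ) : Decidable (Spec_compute_total_extremes games out) := by
  unfold Spec_compute_total_extremes
  have h : DecidableEq (Int × String × Int × String × Int × Int) := inferInstance
  exact decEq _ _

-- ===== CLAIM (what is proved, stated in full; the proofs are below) =====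
def Claim_equal_compute_total_extremes : Prop := ∀ (games : List (Int × Int × String × Int × String × Int)), Dom_compute_total_extremes games → Spec_compute_total_extremes games (compute_total_extremes games)

-- ===== LEMMAS AND PROOFS =====

-- B's combined fold equals the pair of A's max-fold and min-fold over the mapped list
theorem cte_fold_pair (l : List (Int × Int × String × Int × String × Int))
    (b w : Int × String × Int × String × Int × Int) :
    l.foldl cteStepB (b, w) = ((l.map cteTupA).foldl cteMaxStep b, (l.map cteTupA).foldl cteMinStep w) := by
  induction l generalizing b w with
  | nil => rfl
  | cons g t ih =>
    simp only [List.foldl, List.map]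
    rw [ih]
    rfl

-- ===== VERDICT (by name: the statement is the Claim_ definition above) =====
theorem compute_total_extremes_spec : Claim_equal_compute_total_extremes := by
  intro games _
  unfold Spec_compute_total_extremes compute_total_extremes compute_total_extremes_alt
  cases games with
  | nil => rfl
  | cons g rest =>
    simp only [List.map]
    rw [cte_fold_pair]
    rfl
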